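-- pv_equiv track=rewrite | github.com/LeoDorea/Chicago_Bikeshare_Udacity | Leandro Almeida - chicago_bikeshare_pt.py | count_type
-- ===== SOURCE A (Python) =====
-- def column_to_list(data, index):
--     """
--     Funcao que converte os valores de uma couluna de dados em uma linha (lista) de dados
--
--     Argumentos:
--         :param data: Tabela de dados que sera convertida
--         :param index: Coluna que sera convetida para lista (lembrar da indexacao por zero)
--
--     Retorna:
--         :return: Lista com os valores
--     """
--     column_list = []
--     # Dica: Você pode usar um for para iterar sobre as amostras, pegar a feature pelo seu índice, e dar append para uma lista
--     for pos in range(len(data)):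
--         column_list.append(data[pos][index])
--     return column_list
--
-- def count_type(data_list):
--     """
--     Funcao que retorna uma lista com a contagem dos tipos de consumidores do conjunto de dados originais
--
--     Argumentos:
--     :param data_list: Lista com dos dados iniciais
--
--     Retona:
--         :return: Lista com o numero de cada tipo de consumidor)
--     """
--
--     data = column_to_list(data_list, -3)
--     subscriber = customer = dependent = 0
--
--     for pos in range(len(data)):
--         if data[pos] != '':  # Executa a contagem do tipo de usuario apenas se houver dado (diferente de vazio)
--             if data[pos] == 'Subscriber':
--                 subscriber += 1
--             elif data[pos] == 'Customer':
--                 customer += 1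
--             elif data[pos] == 'Dependent':
--                 dependent += 1
--
--     return [subscriber, customer, dependent]
-- ===== SOURCE B (Python) =====
-- def count_type(data_list):
--     data = [row[-3] for row in data_list]
--     return [data.count('Subscriber'), data.count('Customer'), data.count('Dependent')]
-- ===== Notes on version B (the rewrite author's own statement) =====
-- stated objective: idiomatic
-- what changed: Replaces the helper-built column plus a single branching counting loop with three accumulators by a comprehension and three independent list.count scans; the empty-string guard is dropped since no target label is empty.
import Mathlib
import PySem

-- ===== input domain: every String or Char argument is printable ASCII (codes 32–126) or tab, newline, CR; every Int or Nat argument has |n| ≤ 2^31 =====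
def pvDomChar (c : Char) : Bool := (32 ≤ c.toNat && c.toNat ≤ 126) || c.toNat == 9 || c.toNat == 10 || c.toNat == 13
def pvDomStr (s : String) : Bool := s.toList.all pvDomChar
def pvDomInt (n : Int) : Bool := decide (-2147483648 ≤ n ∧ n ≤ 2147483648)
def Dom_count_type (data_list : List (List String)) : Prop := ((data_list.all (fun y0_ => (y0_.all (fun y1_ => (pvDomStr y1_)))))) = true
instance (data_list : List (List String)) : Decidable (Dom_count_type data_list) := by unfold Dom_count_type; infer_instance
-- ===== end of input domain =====

-- B replaces the single branching counting pass over a helper-built column by a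
-- comprehension plus three independent list.count scans (idiomatic; no speed claim).

-- ===== PORT A =====
def column_to_list (data : List (List String)) (index : Int) : List String :=
  (PySem.List.pyRange 0 (PySem.List.len data) 1).foldl
    (fun acc pos => acc ++ [PySem.List.pyGetD (PySem.List.pyGetD data pos []) index ""]) []

-- the body of A's counting loop, branch for branch
def pvCountStep (st : Int × Int × Int) (x : String) : Int × Int × Int :=
  if x ≠ "" then
    if x = "Subscriber" then (st.1 + 1, st.2.1, st.2.2)
    else if x = "Customer" then (st.1, st.2.1 + 1, st.2.2)
    else if x = "Dependent" then (st.1, st.2.1, st.2.2 + 1)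
    else st
  else st

def count_type (data_list : List (List String)) : List Int :=
  let data := column_to_list data_list (-3)
  let r := (PySem.List.pyRange 0 (PySem.List.len data) 1).foldl
    (fun st pos => pvCountStep st (PySem.List.pyGetD data pos "")) (0, 0, 0)
  [r.1, r.2.1, r.2.2]

-- ===== PORT B =====
def count_type_alt (data_list : List (List String)) : List Int :=
  let data := data_list.map (fun row => PySem.List.pyGetD row (-3) "")
  [(data.count "Subscriber" : Int), (data.count "Customer" : Int), (data.count "Dependent" : Int)]

-- ===== PRECONDITION & SPEC =====
-- Pre_ excludes exactly the inputs where some row has fewer than 3 entries: there row[-3] raises IndexError in A.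
def Pre_count_type (data_list : List (List String)) : Prop :=
  ∀ row ∈ data_list, 3 ≤ row.length
instance (data_list : List (List String)) : Decidable (Pre_count_type data_list) := by
  unfold Pre_count_type; infer_instance
def pvWitness_count_type : List (List String) :=
  [["Subscriber", "a", "b"], ["x", "Customer", "y", "z"]]
def Spec_count_type (data_list : List (List String)) (out : List Int) : Prop := out = count_type_alt data_list
instance (data_list : List (List String)) (out : List Int) : Decidable (Spec_count_type data_list out) := by unfold Spec_count_type; infer_instance

-- ===== CLAIM (what is proved, stated in full; the proofs are below) =====
def Claim_equal_count_type : Prop := ∀ (data_list : List (List String)), Dom_count_type data_list → Pre_count_type data_list → Spec_count_type data_list (count_type data_list)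

-- ===== LEMMAS AND PROOFS =====

theorem column_eq (data : List (List String)) :
    column_to_list data (-3) = data.map (fun row => PySem.List.pyGetD row (-3) "") := by
  unfold column_to_list
  rw [PySem.List.foldl_append_singleton_eq_map]
  conv_rhs => rw [← PySem.List.map_pyGetD_pyRange_zero (xs := data) (d := ([] : List String))]
  rw [List.map_map]
  rfl

theorem count_fold (xs : List String) (s c d : Int) :
    xs.foldl pvCountStep (s, c, d)
      = (s + (xs.count "Subscriber" : Int), c + (xs.count "Customer" : Int), d + (xs.count "Dependent" : Int)) := by
  induction xs generalizing s c d with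
  | nil => simp
  | cons x xs ih =>
    simp only [List.foldl_cons, List.count_cons]
    by_cases h1 : x = "Subscriber"
    · subst h1
      have hs : pvCountStep (s, c, d) "Subscriber" = (s + 1, c, d) := by simp [pvCountStep]
      rw [hs, ih]; push_cast; simp; ring
    · by_cases h2 : x = "Customer"
      · subst h2
        have hs : pvCountStep (s, c, d) "Customer" = (s, c + 1, d) := by simp [pvCountStep]
        rw [hs, ih]; push_cast; simp; ring
      · by_cases h3 : x = "Dependent"
        · subst h3
          have hs : pvCountStep (s, c, d) "Dependent" = (s, c, d + 1) := by simp [pvCountStep]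
          rw [hs, ih]; push_cast; simp; ring
        · have hstep : pvCountStep (s, c, d) x = (s, c, d) := by
            unfold pvCountStep
            by_cases h0 : x = ""
            · simp [h0]
            · simp [h0, h1, h2, h3]
          rw [hstep, ih]
          simp [(by simpa using h1 : ¬ (x == "Subscriber")),
            (by simpa using h2 : ¬ (x == "Customer")),
            (by simpa using h3 : ¬ (x == "Dependent"))]

-- ===== VERDICT (by name: the statement is the Claim_ definition above) =====
theorem count_type_spec : Claim_equal_count_type := by
  intro data_list _ _
  unfold Spec_count_type count_type count_type_alt
  simp only [column_eq]
  rw [PySem.List.foldl_pyRange_zero_pyGetD, count_fold]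
  simp
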